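-- pv_equiv track=rewrite | github.com/christofflueck/adventofcode-2024 | day15.py | can_i_move_box
-- ===== SOURCE A (Python) =====
-- def can_i_move_box(
--     boxes: set, border: set, x: int, y: int, dx: int, dy: int, needs_to_move: set
-- ) -> bool:
--     my_pos = (x, y)
--     my_left_pos = (x - 1, y)
--     if my_pos not in boxes and my_left_pos not in boxes:
--         return True
--
--     if my_pos in needs_to_move:
--         return True
--
--     box_hitbox = [(x + dx, y + dy)] if dx != -1 else []
--     if my_pos in boxes:
--         if dx != 1:
--             box_hitbox.append((x + dx + 1, y + dy))
--         needs_to_move.add(my_pos)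
--     else:
--         if dx != 1:
--             box_hitbox.append((x + dx - 1, y + dy))
--         needs_to_move.add(my_left_pos)
--
--     for box in box_hitbox:
--         if box in border:
--             return False
--
--         if not can_i_move_box(boxes, border, box[0], box[1], dx, dy, needs_to_move):
--             return False
--
--     return True
-- ===== SOURCE B (Python) =====
-- def can_i_move_box(
--     boxes: set, border: set, x: int, y: int, dx: int, dy: int, needs_to_move: set
-- ) -> bool:
--     stack = [(x, y)]
--     while stack:
--         cx, cy = stack.pop()
--         pos = (cx, cy)
--         left = (cx - 1, cy)
--         if pos not in boxes and left not in boxes: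
--             continue
--         if pos in needs_to_move:
--             continue
--         hitbox = [] if dx == -1 else [(cx + dx, cy + dy)]
--         if pos in boxes:
--             needs_to_move.add(pos)
--             if dx != 1:
--                 hitbox.append((cx + dx + 1, cy + dy))
--         else:
--             needs_to_move.add(left)
--             if dx != 1:
--                 hitbox.append((cx + dx - 1, cy + dy))
--         if any(cell in border for cell in hitbox):
--             return False
--         stack.extend(reversed(hitbox))
--     return True
-- ===== Notes on version B (the rewrite author's own statement) =====
-- stated objective: alternative
-- what changed: Replaces A's recursion (with an inner for-loop over the hitbox) by an iterative DFS driven by an explicit stack of cells, with the whole hitbox border-checked up front before pushing; Pre_ excludes (dx, dy) = (0, 0), on which the search can revisit the same cell forever so A diverges with RecursionError except on degenerate inputs.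
-- outside the precondition, e.g. on can_i_move_box(set(), set(), 0, 0, 0, 0, set()): A returns True, B returns True; on can_i_move_box({(0, 0)}, set(), 5, 5, 0, 0, set()): A returns True, B returns True
import Mathlib
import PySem

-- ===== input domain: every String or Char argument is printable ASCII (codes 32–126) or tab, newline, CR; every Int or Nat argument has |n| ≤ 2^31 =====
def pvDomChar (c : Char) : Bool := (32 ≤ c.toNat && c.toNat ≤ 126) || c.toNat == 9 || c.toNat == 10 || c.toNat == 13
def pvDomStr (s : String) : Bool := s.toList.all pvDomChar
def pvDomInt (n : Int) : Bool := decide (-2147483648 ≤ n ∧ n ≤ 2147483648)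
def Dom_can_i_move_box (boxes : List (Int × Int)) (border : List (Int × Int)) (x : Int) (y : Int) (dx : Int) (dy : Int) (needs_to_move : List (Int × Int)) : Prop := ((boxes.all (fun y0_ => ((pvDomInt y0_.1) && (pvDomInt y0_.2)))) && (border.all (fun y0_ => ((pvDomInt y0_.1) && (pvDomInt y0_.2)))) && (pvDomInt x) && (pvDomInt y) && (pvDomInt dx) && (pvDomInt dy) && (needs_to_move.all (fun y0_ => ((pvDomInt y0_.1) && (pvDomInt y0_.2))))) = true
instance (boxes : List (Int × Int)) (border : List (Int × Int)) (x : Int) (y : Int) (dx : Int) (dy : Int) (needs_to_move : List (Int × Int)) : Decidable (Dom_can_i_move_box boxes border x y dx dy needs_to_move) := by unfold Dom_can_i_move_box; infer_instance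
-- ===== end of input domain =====

-- B replaces A's recursion by an iterative DFS over an explicit stack (alternative decomposition,
-- same cost); A mutates needs_to_move in place and the equivalence proved here is about the RETURN
-- value only.  Both ports are fueled transliterations (fuel = none means the Python does not
-- terminate); within Pre_ the fuel is proved sufficient.

-- ===== PORT A =====
-- A's inner 'for box in box_hitbox' loop, with the recursive call abstracted as 'go'
-- (sequential: border check, then recurse, threading needs_to_move; early return on False).
def pvLoopGen (border : List (Int × Int)) (go : Int → Int → List (Int × Int) → Option (Bool × List (Int × Int))) :
    List (Int × Int) → List (Int × Int) → Option (Bool × List (Int × Int))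
  | [], ntm => some (true, ntm)
  | c :: cs, ntm =>
    if c ∈ border then some (false, ntm)
    else match go c.1 c.2 ntm with
      | none => none
      | some (false, ntm') => some (false, ntm')
      | some (true, ntm') => pvLoopGen border go cs ntm'

-- A itself, fuel-indexed (none = the recursion has not terminated within 'fuel' nesting depth).
def pvGoA (boxes border : List (Int × Int)) (dx dy : Int) :
    Nat → Int → Int → List (Int × Int) → Option (Bool × List (Int × Int))
  | 0, _, _, _ => none
  | f + 1, x, y, ntm =>
    if (x, y) ∉ boxes ∧ (x - 1, y) ∉ boxes then some (true, ntm)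
    else if (x, y) ∈ ntm then some (true, ntm)
    else
      let hit0 : List (Int × Int) := if dx ≠ -1 then [(x + dx, y + dy)] else []
      if (x, y) ∈ boxes then
        pvLoopGen border (fun cx cy s => pvGoA boxes border dx dy f cx cy s)
          (if dx ≠ 1 then hit0 ++ [(x + dx + 1, y + dy)] else hit0) (PySem.Set.add ntm (x, y))
      else
        pvLoopGen border (fun cx cy s => pvGoA boxes border dx dy f cx cy s)
          (if dx ≠ 1 then hit0 ++ [(x + dx - 1, y + dy)] else hit0) (PySem.Set.add ntm (x - 1, y))

-- fuel 2*|boxes|+2 is proved sufficient on Pre_ (recursion depth bound); outside Pre_ nothing is claimed.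
def can_i_move_box (boxes : List (Int × Int)) (border : List (Int × Int)) (x : Int) (y : Int) (dx : Int) (dy : Int) (needs_to_move : List (Int × Int)) : Bool :=
  match pvGoA boxes border dx dy (2 * boxes.length + 2) x y needs_to_move with
  | some (r, _) => r
  | none => false

-- ===== PORT B =====
-- Source B's while loop: list with head = top of stack; 'stack.extend(reversed(hitbox))' + pop
-- from the end = 'hitbox ++ rest'.  One fuel unit per pop (none = the loop has not finished).
def pvRunB (boxes border : List (Int × Int)) (dx dy : Int) :
    Nat → List (Int × Int) → List (Int × Int) → Option Bool
  | 0, _, _ => none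
  | _ + 1, [], _ => some true
  | f + 1, (cx, cy) :: rest, ntm =>
    if (cx, cy) ∉ boxes ∧ (cx - 1, cy) ∉ boxes then pvRunB boxes border dx dy f rest ntm
    else if (cx, cy) ∈ ntm then pvRunB boxes border dx dy f rest ntm
    else
      let hit0 : List (Int × Int) := if dx = -1 then [] else [(cx + dx, cy + dy)]
      let hitbox : List (Int × Int) :=
        if (cx, cy) ∈ boxes then (if dx ≠ 1 then hit0 ++ [(cx + dx + 1, cy + dy)] else hit0)
        else (if dx ≠ 1 then hit0 ++ [(cx + dx - 1, cy + dy)] else hit0)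
      let ntm' : List (Int × Int) :=
        if (cx, cy) ∈ boxes then PySem.Set.add ntm (cx, cy) else PySem.Set.add ntm (cx - 1, cy)
      if hitbox.any (fun c => decide (c ∈ border)) then some false
      else pvRunB boxes border dx dy f (hitbox ++ rest) ntm'

-- fuel 3^(2*|boxes|+2)+1 is proved sufficient on Pre_ (the DFS tree of depth d has < 3^d nodes).
def can_i_move_box_alt (boxes : List (Int × Int)) (border : List (Int × Int)) (x : Int) (y : Int) (dx : Int) (dy : Int) (needs_to_move : List (Int × Int)) : Bool :=
  match pvRunB boxes border dx dy (3 ^ (2 * boxes.length + 2) + 1) [(x, y)] needs_to_move with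
  | some r => r
  | none => false

-- ===== PRECONDITION & SPEC =====
-- Pre_ excludes (dx, dy) = (0, 0): there the recursion can revisit the same cell forever, so A
-- diverges (RecursionError) on most such inputs and returns only on degenerate ones.
def Pre_can_i_move_box (boxes : List (Int × Int)) (border : List (Int × Int)) (x : Int) (y : Int) (dx : Int) (dy : Int) (needs_to_move : List (Int × Int)) : Prop :=
  ¬ (dx = 0 ∧ dy = 0)
instance (boxes : List (Int × Int)) (border : List (Int × Int)) (x : Int) (y : Int) (dx : Int) (dy : Int) (needs_to_move : List (Int × Int)) : Decidable (Pre_can_i_move_box boxes border x y dx dy needs_to_move) := by unfold Pre_can_i_move_box; infer_instance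

def pvWitness_can_i_move_box : (List (Int × Int)) × (List (Int × Int)) × Int × Int × Int × Int × (List (Int × Int)) :=
  ([(0, 0)], [(0, 2)], 0, 0, 0, 1, [])

def Spec_can_i_move_box (boxes : List (Int × Int)) (border : List (Int × Int)) (x : Int) (y : Int) (dx : Int) (dy : Int) (needs_to_move : List (Int × Int)) (out : Bool) : Prop := out = can_i_move_box_alt boxes border x y dx dy needs_to_move
instance (boxes : List (Int × Int)) (border : List (Int × Int)) (x : Int) (y : Int) (dx : Int) (dy : Int) (needs_to_move : List (Int × Int)) (out : Bool) : Decidable (Spec_can_i_move_box boxes border x y dx dy needs_to_move out) := by unfold Spec_can_i_move_box; infer_instance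

-- ===== CLAIM (what is proved, stated in full; the proofs are below) =====
def Claim_equal_can_i_move_box : Prop := ∀ (boxes : List (Int × Int)) (border : List (Int × Int)) (x : Int) (y : Int) (dx : Int) (dy : Int) (needs_to_move : List (Int × Int)), Dom_can_i_move_box boxes border x y dx dy needs_to_move → Pre_can_i_move_box boxes border x y dx dy needs_to_move → Spec_can_i_move_box boxes border x y dx dy needs_to_move (can_i_move_box boxes border x y dx dy needs_to_move)

-- ===== LEMMAS AND PROOFS =====

-- one-step unfolding of pvGoA at successor fuel (definitional)
theorem pvGoA_succ (boxes border : List (Int × Int)) (dx dy : Int) (f : Nat) (x y : Int)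
    (ntm : List (Int × Int)) :
    pvGoA boxes border dx dy (f + 1) x y ntm =
      (if (x, y) ∉ boxes ∧ (x - 1, y) ∉ boxes then some (true, ntm)
      else if (x, y) ∈ ntm then some (true, ntm)
      else if (x, y) ∈ boxes then
        pvLoopGen border (fun cx cy s0 => pvGoA boxes border dx dy f cx cy s0)
          (if dx ≠ 1 then (if dx ≠ -1 then [(x + dx, y + dy)] else []) ++ [(x + dx + 1, y + dy)]
           else (if dx ≠ -1 then [(x + dx, y + dy)] else [])) (PySem.Set.add ntm (x, y))
      else
        pvLoopGen border (fun cx cy s0 => pvGoA boxes border dx dy f cx cy s0)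
          (if dx ≠ 1 then (if dx ≠ -1 then [(x + dx, y + dy)] else []) ++ [(x + dx - 1, y + dy)]
           else (if dx ≠ -1 then [(x + dx, y + dy)] else [])) (PySem.Set.add ntm (x - 1, y))) := rfl


-- small integer facts used for the decreasing measure
theorem pvSq (dx : Int) (h0 : dx ≠ 0) : 1 ≤ dx * dx := by
  have := mul_self_pos.mpr h0; linarith

theorem pvMulAddOne (dx : Int) (h0 : dx ≠ 0) (hm : dx ≠ -1) : 1 ≤ (dx + 1) * dx := by
  rcases lt_trichotomy dx 0 with h | h | h
  · have : dx ≤ -2 := by omega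
    nlinarith
  · exact absurd h h0
  · nlinarith

theorem pvMulSubOne (dx : Int) (h0 : dx ≠ 0) (h1 : dx ≠ 1) : 1 ≤ (dx - 1) * dx := by
  rcases lt_trichotomy dx 0 with h | h | h
  · nlinarith
  · exact absurd h h0
  · have : 2 ≤ dx := by omega
    nlinarith

-- fuel monotonicity for B's stack machine
theorem pvRunB_mono (boxes border : List (Int × Int)) (dx dy : Int) :
    ∀ (f f' : Nat), f ≤ f' → ∀ (stack ntm : List (Int × Int)) (v : Bool),
      pvRunB boxes border dx dy f stack ntm = some v →
      pvRunB boxes border dx dy f' stack ntm = some v := by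
  intro f
  induction f with
  | zero => intro f' _ stack ntm v h; simp [pvRunB] at h
  | succ f ih =>
    intro f' hf stack ntm v h
    obtain ⟨f'', rfl⟩ : ∃ k, f' = k + 1 := ⟨f' - 1, by omega⟩
    have hff : f ≤ f'' := by omega
    match stack with
    | [] => simpa [pvRunB] using h
    | (cx, cy) :: rest =>
      simp only [pvRunB] at h ⊢
      split_ifs at h ⊢
      all_goals first
        | exact h
        | exact ih f'' hff _ _ _ h

-- a loop over a list containing a border cell cannot return True
theorem pvLoopGen_border_false (border : List (Int × Int))
    (go : Int → Int → List (Int × Int) → Option (Bool × List (Int × Int))) :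
    ∀ (l s : List (Int × Int)) (r : Bool) (s' : List (Int × Int)),
      pvLoopGen border go l s = some (r, s') → (∃ c ∈ l, c ∈ border) → r = false := by
  intro l
  induction l with
  | nil => intro s r s' _ hex; simp at hex
  | cons a as ih =>
    intro s r s' h hex
    simp only [pvLoopGen] at h
    split_ifs at h with hb
    · cases h; rfl
    · cases hg : go a.1 a.2 s with
      | none => rw [hg] at h; simp at h
      | some p =>
        rw [hg] at h
        obtain ⟨b, s1⟩ := p
        cases b
        · cases h; rfl
        · rcases hex with ⟨c, hc, hcb⟩
          rcases List.mem_cons.mp hc with rfl | hc'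
          · exact absurd hcb hb
          · exact ih _ _ _ h ⟨c, hc', hcb⟩

-- simulation of A's loop by B's stack, given the simulation for one call at depth d
theorem pvSimLoop (boxes border : List (Int × Int)) (dx dy : Int) (d : Nat)
    (IH : ∀ (x y : Int) (s : List (Int × Int)) (r : Bool) (s' : List (Int × Int)),
      pvGoA boxes border dx dy d x y s = some (r, s') →
      ∀ (stack : List (Int × Int)) (m : Nat),
        (r = true → ∀ v, pvRunB boxes border dx dy m stack s' = some v →
            pvRunB boxes border dx dy (3 ^ d + m) ((x, y) :: stack) s = some v) ∧
        (r = false → pvRunB boxes border dx dy (3 ^ d + m) ((x, y) :: stack) s = some false)) :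
    ∀ (l s : List (Int × Int)) (r : Bool) (s' : List (Int × Int)),
      pvLoopGen border (fun cx cy s0 => pvGoA boxes border dx dy d cx cy s0) l s = some (r, s') →
      ∀ (stack : List (Int × Int)) (m : Nat),
        (r = true → ∀ v, pvRunB boxes border dx dy m stack s' = some v →
            pvRunB boxes border dx dy (l.length * 3 ^ d + m) (l ++ stack) s = some v) ∧
        (r = false → (∀ c ∈ l, c ∉ border) →
            pvRunB boxes border dx dy (l.length * 3 ^ d + m) (l ++ stack) s = some false) := by
  intro l
  induction l with
  | nil =>
    intro s r s' h stack m
    simp only [pvLoopGen] at h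
    obtain ⟨rfl, rfl⟩ : true = r ∧ s = s' := by
      have := Option.some.inj h; exact ⟨congrArg Prod.fst this, congrArg Prod.snd this⟩
    constructor
    · intro _ v hv; simpa using hv
    · intro hf; simp at hf
  | cons a as ih =>
    intro s r s' h stack m
    simp only [pvLoopGen] at h
    split_ifs at h with hb
    · obtain ⟨rfl, rfl⟩ : false = r ∧ s = s' := by
        have := Option.some.inj h; exact ⟨congrArg Prod.fst this, congrArg Prod.snd this⟩
      constructor
      · intro ht; simp at ht
      · intro _ hnb; exact absurd hb (hnb a (by simp))
    · cases hg : pvGoA boxes border dx dy d a.1 a.2 s with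
      | none => rw [hg] at h; simp at h
      | some p =>
        obtain ⟨r1, s1⟩ := p
        rw [hg] at h
        cases r1 with
        | false =>
          obtain ⟨rfl, rfl⟩ : false = r ∧ s1 = s' := by
            have := Option.some.inj (by simpa using h : some ((false : Bool), s1) = some (r, s'))
            exact ⟨congrArg Prod.fst this, congrArg Prod.snd this⟩
          constructor
          · intro ht; simp at ht
          · intro _ _
            have hIH := (IH a.1 a.2 s false s1 hg (as ++ stack) (as.length * 3 ^ d + m)).2 rfl
            rw [List.length_cons,
              (by ring : (as.length + 1) * 3 ^ d + m = 3 ^ d + (as.length * 3 ^ d + m))]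
            simpa using hIH
        | true =>
          replace h : pvLoopGen border (fun cx cy s0 => pvGoA boxes border dx dy d cx cy s0) as s1
              = some (r, s') := by simpa using h
          have hIHa := IH a.1 a.2 s true s1 hg
          have hih := ih s1 r s' h
          constructor
          · intro ht v hv
            have h1 := (hih stack m).1 ht v hv
            have h2 := (hIHa (as ++ stack) (as.length * 3 ^ d + m)).1 rfl v h1
            rw [List.length_cons,
              (by ring : (as.length + 1) * 3 ^ d + m = 3 ^ d + (as.length * 3 ^ d + m))]
            simpa using h2
          · intro hf hnb
            have h1 := (hih stack m).2 hf (fun c hc => hnb c (List.mem_cons_of_mem a hc))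
            have h2 := (hIHa (as ++ stack) (as.length * 3 ^ d + m)).1 rfl false h1
            rw [List.length_cons,
              (by ring : (as.length + 1) * 3 ^ d + m = 3 ^ d + (as.length * 3 ^ d + m))]
            simpa using h2

-- the common shape of B's expansion step, related to A's loop over the same hitbox
theorem pvSimExpandCore (boxes border : List (Int × Int)) (dx dy : Int) (d : Nat)
    (IH : ∀ (x y : Int) (s : List (Int × Int)) (r : Bool) (s' : List (Int × Int)),
      pvGoA boxes border dx dy d x y s = some (r, s') →
      ∀ (stack : List (Int × Int)) (m : Nat),
        (r = true → ∀ v, pvRunB boxes border dx dy m stack s' = some v →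
            pvRunB boxes border dx dy (3 ^ d + m) ((x, y) :: stack) s = some v) ∧
        (r = false → pvRunB boxes border dx dy (3 ^ d + m) ((x, y) :: stack) s = some false))
    (hit : List (Int × Int)) (hlen : hit.length ≤ 2) (ntm' s' : List (Int × Int)) (r : Bool)
    (hloop : pvLoopGen border (fun cx cy s0 => pvGoA boxes border dx dy d cx cy s0) hit ntm'
      = some (r, s'))
    (stack : List (Int × Int)) (k m : Nat) (hk : 3 ^ (d + 1) + m = k + 1) :
    (r = true → ∀ v, pvRunB boxes border dx dy m stack s' = some v →
        (if hit.any (fun c => decide (c ∈ border)) then some false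
         else pvRunB boxes border dx dy k (hit ++ stack) ntm') = some v) ∧
    (r = false →
        (if hit.any (fun c => decide (c ∈ border)) then some false
         else pvRunB boxes border dx dy k (hit ++ stack) ntm') = some false) := by
  have h3 : 0 < 3 ^ d := Nat.pow_pos (by norm_num)
  have hle : hit.length * 3 ^ d + m ≤ k := by
    have h1 : hit.length * 3 ^ d ≤ 2 * 3 ^ d := Nat.mul_le_mul_right _ hlen
    have h2 : 3 ^ (d + 1) = 3 * 3 ^ d := by rw [pow_succ]; ring
    omega
  by_cases hany : hit.any (fun c => decide (c ∈ border)) = true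
  · have hex : ∃ c ∈ hit, c ∈ border := by
      simpa [List.any_eq_true, decide_eq_true_eq] using hany
    have hr : r = false := pvLoopGen_border_false border _ hit ntm' r s' hloop hex
    subst hr
    rw [if_pos hany]
    exact ⟨fun ht => by simp at ht, fun _ => rfl⟩
  · have hany' : hit.any (fun c => decide (c ∈ border)) = false := eq_false_of_ne_true hany
    have hnb : ∀ c ∈ hit, c ∉ border := by
      simpa [List.any_eq_false, decide_eq_true_eq] using hany'
    rw [if_neg hany]
    have hsim := pvSimLoop boxes border dx dy d IH hit ntm' r s' hloop stack m
    constructor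
    · intro ht v hv
      exact pvRunB_mono boxes border dx dy _ k hle _ _ _ ((hsim).1 ht v hv)
    · intro hf
      exact pvRunB_mono boxes border dx dy _ k hle _ _ _ ((hsim).2 hf hnb)

-- the main simulation: B's stack machine computes what A's recursion computes
theorem pvSimGo (boxes border : List (Int × Int)) (dx dy : Int) :
    ∀ (d : Nat) (x y : Int) (s : List (Int × Int)) (r : Bool) (s' : List (Int × Int)),
      pvGoA boxes border dx dy d x y s = some (r, s') →
      ∀ (stack : List (Int × Int)) (m : Nat),
        (r = true → ∀ v, pvRunB boxes border dx dy m stack s' = some v →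
            pvRunB boxes border dx dy (3 ^ d + m) ((x, y) :: stack) s = some v) ∧
        (r = false → pvRunB boxes border dx dy (3 ^ d + m) ((x, y) :: stack) s = some false) := by
  intro d
  induction d with
  | zero => intro x y s r s' h; simp [pvGoA] at h
  | succ d ih =>
    intro x y s r s' h stack m
    have h3 : 0 < 3 ^ (d + 1) := Nat.pow_pos (by norm_num)
    obtain ⟨k, hk⟩ : ∃ k, 3 ^ (d + 1) + m = k + 1 := ⟨3 ^ (d + 1) + m - 1, by omega⟩
    have hhit0 : (if dx = -1 then ([] : List (Int × Int)) else [(x + dx, y + dy)])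
        = (if dx ≠ -1 then [(x + dx, y + dy)] else []) := by
      by_cases hdx : dx = -1 <;> simp [hdx]
    simp only [pvGoA] at h
    by_cases h1 : (x, y) ∉ boxes ∧ (x - 1, y) ∉ boxes
    · rw [if_pos h1] at h
      obtain ⟨rfl, rfl⟩ : true = r ∧ s = s' := by
        have := Option.some.inj h; exact ⟨congrArg Prod.fst this, congrArg Prod.snd this⟩
      refine ⟨fun _ v hv => ?_, fun hf => by simp at hf⟩
      rw [hk]
      simp only [pvRunB]
      rw [if_pos h1]
      exact pvRunB_mono boxes border dx dy m k (by omega) _ _ _ hv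
    · rw [if_neg h1] at h
      by_cases h2 : (x, y) ∈ s
      · rw [if_pos h2] at h
        obtain ⟨rfl, rfl⟩ : true = r ∧ s = s' := by
          have := Option.some.inj h; exact ⟨congrArg Prod.fst this, congrArg Prod.snd this⟩
        refine ⟨fun _ v hv => ?_, fun hf => by simp at hf⟩
        rw [hk]
        simp only [pvRunB]
        rw [if_neg h1, if_pos h2]
        exact pvRunB_mono boxes border dx dy m k (by omega) _ _ _ hv
      · rw [if_neg h2] at h
        by_cases hbx : (x, y) ∈ boxes
        · rw [if_pos hbx] at h
          have hlen : (if dx ≠ 1 then (if dx ≠ -1 then [(x + dx, y + dy)] else [])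
              ++ [(x + dx + 1, y + dy)] else (if dx ≠ -1 then [(x + dx, y + dy)] else [])).length
              ≤ 2 := by split_ifs <;> simp
          have hcore := pvSimExpandCore boxes border dx dy d ih _ hlen _ s' r h stack k m hk
          constructor
          · intro ht v hv
            have hc := hcore.1 ht v hv
            rw [hk]
            simp only [pvRunB]
            rw [if_neg h1, if_neg h2, hhit0]
            simp only [if_pos hbx]
            exact hc
          · intro hf
            have hc := hcore.2 hf
            rw [hk]
            simp only [pvRunB]
            rw [if_neg h1, if_neg h2, hhit0]
            simp only [if_pos hbx]
            exact hc
        · rw [if_neg hbx] at h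
          have hlen : (if dx ≠ 1 then (if dx ≠ -1 then [(x + dx, y + dy)] else [])
              ++ [(x + dx - 1, y + dy)] else (if dx ≠ -1 then [(x + dx, y + dy)] else [])).length
              ≤ 2 := by split_ifs <;> simp
          have hcore := pvSimExpandCore boxes border dx dy d ih _ hlen _ s' r h stack k m hk
          constructor
          · intro ht v hv
            have hc := hcore.1 ht v hv
            rw [hk]
            simp only [pvRunB]
            rw [if_neg h1, if_neg h2, hhit0]
            simp only [if_neg hbx]
            exact hc
          · intro hf
            have hc := hcore.2 hf
            rw [hk]
            simp only [pvRunB]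
            rw [if_neg h1, if_neg h2, hhit0]
            simp only [if_neg hbx]
            exact hc

-- ===== termination of A within Pre_ =====

-- the decreasing measure: boxes not yet passed in the push direction
def pvMeas (boxes : List (Int × Int)) (dx dy x y : Int) : Nat :=
  if dy ≠ 0 then (boxes.filter (fun b => decide (0 ≤ (b.2 - y) * dy))).length
  else (boxes.filter (fun b => decide (0 ≤ (b.1 - x) * dx))).length +
       (boxes.filter (fun b => decide (0 ≤ (b.1 - x + 1) * dx))).length

theorem pvFilterMono {α : Type} (l : List α) (p q : α → Bool)
    (hpq : ∀ a ∈ l, q a = true → p a = true) :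
    (l.filter q).length ≤ (l.filter p).length := by
  induction l with
  | nil => simp
  | cons a as ih =>
    have ih' := ih (fun b hb => hpq b (List.mem_cons_of_mem a hb))
    by_cases hq : q a = true
    · have hp := hpq a (by simp) hq
      simp [List.filter_cons, hp, hq]
      omega
    · have hq' : q a = false := eq_false_of_ne_true hq
      by_cases hp : p a = true
      · simp [List.filter_cons, hp, hq']
        omega
      · simp [List.filter_cons, eq_false_of_ne_true hp, hq']
        omega

theorem pvFilterLt {α : Type} (l : List α) (p q : α → Bool)
    (hpq : ∀ a ∈ l, q a = true → p a = true)
    (a0 : α) (ha0 : a0 ∈ l) (hp0 : p a0 = true) (hq0 : q a0 = false) :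
    (l.filter q).length < (l.filter p).length := by
  induction l with
  | nil => cases ha0
  | cons a as ih =>
    have hmono : (as.filter q).length ≤ (as.filter p).length :=
      pvFilterMono as p q (fun b hb => hpq b (List.mem_cons_of_mem a hb))
    rcases List.mem_cons.mp ha0 with rfl | hmem
    · simp [List.filter_cons, hp0, hq0]
      omega
    · have ih' := ih (fun b hb => hpq b (List.mem_cons_of_mem a hb)) hmem
      by_cases hq : q a = true
      · have hp := hpq a (by simp) hq
        simp [List.filter_cons, hp, hq]
        omega
      · have hq' : q a = false := eq_false_of_ne_true hq
        by_cases hp : p a = true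
        · simp [List.filter_cons, hp, hq']
          omega
        · simp [List.filter_cons, eq_false_of_ne_true hp, hq']
          omega

theorem pvMeas_child_dy (boxes : List (Int × Int)) (dx dy x y cx : Int) (hdy : dy ≠ 0)
    (b0 : Int × Int) (hb0 : b0 ∈ boxes) (hb0y : b0.2 = y) :
    pvMeas boxes dx dy cx (y + dy) < pvMeas boxes dx dy x y := by
  have hdy2 : 0 < dy * dy := mul_self_pos.mpr hdy
  simp only [pvMeas, if_pos hdy]
  apply pvFilterLt
  · intro b _ hq
    simp only [decide_eq_true_eq] at hq ⊢
    have hring : (b.2 - y) * dy = (b.2 - (y + dy)) * dy + dy * dy := by ring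
    linarith
  · exact hb0
  · simp only [decide_eq_true_eq, hb0y]
    have : (y - y) * dy = 0 := by ring
    linarith
  · simp only [decide_eq_false_iff_not, not_le, hb0y]
    have : (y - (y + dy)) * dy = -(dy * dy) := by ring
    linarith

theorem pvMeas_child_dx (boxes : List (Int × Int)) (dx : Int) (hdx : dx ≠ 0)
    (x cx y cy : Int) (hstep : 1 ≤ (cx - x) * dx)
    (b0 : Int × Int) (hb0 : b0 ∈ boxes) (hb0x : b0.1 = x ∨ b0.1 = x - 1) :
    pvMeas boxes dx 0 cx cy < pvMeas boxes dx 0 x y := by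
  simp only [pvMeas, if_neg (by simp : ¬((0 : Int) ≠ 0))]
  have hmono1 : ((boxes.filter (fun b => decide (0 ≤ (b.1 - cx) * dx))).length : Nat)
      ≤ (boxes.filter (fun b => decide (0 ≤ (b.1 - x) * dx))).length := by
    apply pvFilterMono
    intro b _ hq
    simp only [decide_eq_true_eq] at hq ⊢
    have hring : (b.1 - x) * dx = (b.1 - cx) * dx + (cx - x) * dx := by ring
    linarith
  have hmono2 : ((boxes.filter (fun b => decide (0 ≤ (b.1 - cx + 1) * dx))).length : Nat)
      ≤ (boxes.filter (fun b => decide (0 ≤ (b.1 - x + 1) * dx))).length := by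
    apply pvFilterMono
    intro b _ hq
    simp only [decide_eq_true_eq] at hq ⊢
    have hring : (b.1 - x + 1) * dx = (b.1 - cx + 1) * dx + (cx - x) * dx := by ring
    linarith
  rcases hb0x with hb1 | hb1
  · have hstrict : ((boxes.filter (fun b => decide (0 ≤ (b.1 - cx) * dx))).length : Nat)
        < (boxes.filter (fun b => decide (0 ≤ (b.1 - x) * dx))).length := by
      apply pvFilterLt _ _ _ (fun b _ hq => ?_) b0 hb0
      · simp only [decide_eq_true_eq, hb1]
        have : (x - x) * dx = 0 := by ring
        linarith
      · simp only [decide_eq_false_iff_not, not_le, hb1]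
        have : (x - cx) * dx = -((cx - x) * dx) := by ring
        linarith
      · simp only [decide_eq_true_eq] at hq ⊢
        have hring : (b.1 - x) * dx = (b.1 - cx) * dx + (cx - x) * dx := by ring
        linarith
    omega
  · have hstrict : ((boxes.filter (fun b => decide (0 ≤ (b.1 - cx + 1) * dx))).length : Nat)
        < (boxes.filter (fun b => decide (0 ≤ (b.1 - x + 1) * dx))).length := by
      apply pvFilterLt _ _ _ (fun b _ hq => ?_) b0 hb0
      · simp only [decide_eq_true_eq, hb1]
        have : (x - 1 - x + 1) * dx = 0 := by ring
        linarith
      · simp only [decide_eq_false_iff_not, not_le, hb1]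
        have : (x - 1 - cx + 1) * dx = -((cx - x) * dx) := by ring
        linarith
      · simp only [decide_eq_true_eq] at hq ⊢
        have hring : (b.1 - x + 1) * dx = (b.1 - cx + 1) * dx + (cx - x) * dx := by ring
        linarith
    omega

theorem pvMeas_pos (boxes : List (Int × Int)) (dx dy x y : Int)
    (b0 : Int × Int) (hb0 : b0 ∈ boxes) (hb0' : b0 = (x, y) ∨ b0 = (x - 1, y)) :
    1 ≤ pvMeas boxes dx dy x y := by
  unfold pvMeas
  split_ifs with hdy
  · have hm : b0 ∈ boxes.filter (fun b => decide (0 ≤ (b.2 - y) * dy)) := by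
      refine List.mem_filter.mpr ⟨hb0, ?_⟩
      rcases hb0' with rfl | rfl <;> simp
    exact List.length_pos_of_mem hm
  · rcases hb0' with rfl | rfl
    · have hm : (x, y) ∈ boxes.filter (fun b => decide (0 ≤ (b.1 - x) * dx)) :=
        List.mem_filter.mpr ⟨hb0, by simp⟩
      have := List.length_pos_of_mem hm
      omega
    · have hm : (x - 1, y) ∈ boxes.filter (fun b => decide (0 ≤ (b.1 - x + 1) * dx)) :=
        List.mem_filter.mpr ⟨hb0, by simp⟩
      have := List.length_pos_of_mem hm
      omega

theorem pvMeas_le (boxes : List (Int × Int)) (dx dy x y : Int) :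
    pvMeas boxes dx dy x y ≤ 2 * boxes.length + 1 := by
  unfold pvMeas
  split_ifs
  · have := List.length_filter_le (fun b => decide (0 ≤ ((b : Int × Int).2 - y) * dy)) boxes
    omega
  · have h1 := List.length_filter_le (fun b => decide (0 ≤ ((b : Int × Int).1 - x) * dx)) boxes
    have h2 := List.length_filter_le (fun b => decide (0 ≤ ((b : Int × Int).1 - x + 1) * dx)) boxes
    omega

theorem pvLoopGen_ne_none (border : List (Int × Int))
    (go : Int → Int → List (Int × Int) → Option (Bool × List (Int × Int))) :
    ∀ (l : List (Int × Int)), (∀ c ∈ l, ∀ s, go c.1 c.2 s ≠ none) →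
      ∀ ntm, pvLoopGen border go l ntm ≠ none := by
  intro l
  induction l with
  | nil => intro _ ntm; simp [pvLoopGen]
  | cons a as ih =>
    intro h ntm
    simp only [pvLoopGen]
    split_ifs with hb
    · simp
    · cases hg : go a.1 a.2 ntm with
      | none => exact absurd hg (h a (by simp) ntm)
      | some p =>
        obtain ⟨b, s'⟩ := p
        cases b
        · simp
        · exact ih (fun c hc s => h c (List.mem_cons_of_mem a hc) s) s'

-- every hitbox cell of the general case strictly decreases the measure
theorem pvChildTerm (boxes border : List (Int × Int)) (dx dy : Int)
    (hpre : ¬(dx = 0 ∧ dy = 0)) (k : Nat)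
    (IH : ∀ (x y : Int) (ntm : List (Int × Int)), pvMeas boxes dx dy x y ≤ k →
      pvGoA boxes border dx dy (k + 1) x y ntm ≠ none)
    (x y : Int) (hm : pvMeas boxes dx dy x y ≤ k + 1)
    (b0 : Int × Int) (hb0 : b0 ∈ boxes) (hb0' : b0 = (x, y) ∨ b0 = (x - 1, y))
    (hit : List (Int × Int))
    (hhit : ∀ c ∈ hit, c.2 = y + dy ∧ (dy = 0 → 1 ≤ (c.1 - x) * dx)) :
    ∀ ntm0, pvLoopGen border (fun cx cy s0 => pvGoA boxes border dx dy (k + 1) cx cy s0)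
      hit ntm0 ≠ none := by
  intro ntm0
  apply pvLoopGen_ne_none
  intro c hc s
  obtain ⟨hc2, hc1⟩ := hhit c hc
  have hlt : pvMeas boxes dx dy c.1 c.2 < pvMeas boxes dx dy x y := by
    by_cases hdy : dy = 0
    · subst hdy
      have hdx : dx ≠ 0 := fun hdd => hpre ⟨hdd, rfl⟩
      refine pvMeas_child_dx boxes dx hdx x c.1 y c.2 (hc1 rfl) b0 hb0 ?_
      rcases hb0' with rfl | rfl <;> simp
    · rw [hc2]
      refine pvMeas_child_dy boxes dx dy x y c.1 hdy b0 hb0 ?_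
      rcases hb0' with rfl | rfl <;> rfl
  exact IH c.1 c.2 s (by omega)

theorem pvGoA_ne_none (boxes border : List (Int × Int)) (dx dy : Int)
    (hpre : ¬(dx = 0 ∧ dy = 0)) :
    ∀ (n : Nat) (x y : Int) (ntm : List (Int × Int)), pvMeas boxes dx dy x y ≤ n →
      pvGoA boxes border dx dy (n + 1) x y ntm ≠ none := by
  intro n
  induction n with
  | zero =>
    intro x y ntm hm
    rw [pvGoA_succ]
    by_cases h1 : (x, y) ∉ boxes ∧ (x - 1, y) ∉ boxes
    · rw [if_pos h1]; simp
    · by_cases hbx : (x, y) ∈ boxes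
      · exact absurd hm (by
          have := pvMeas_pos boxes dx dy x y (x, y) hbx (Or.inl rfl); omega)
      · have hlb : (x - 1, y) ∈ boxes := by
          rcases not_and_or.mp h1 with hh | hh
          · exact absurd (not_not.mp hh) hbx
          · exact not_not.mp hh
        exact absurd hm (by
          have := pvMeas_pos boxes dx dy x y (x - 1, y) hlb (Or.inr rfl); omega)
  | succ k IH =>
    intro x y ntm hm
    rw [pvGoA_succ]
    by_cases h1 : (x, y) ∉ boxes ∧ (x - 1, y) ∉ boxes
    · rw [if_pos h1]; simp
    · rw [if_neg h1]
      by_cases h2 : (x, y) ∈ ntm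
      · rw [if_pos h2]; simp
      · rw [if_neg h2]
        by_cases hbx : (x, y) ∈ boxes
        · rw [if_pos hbx]
          by_cases hsp : dy = 0 ∧ dx = -1
          · -- the stalling child (x, y): pruned immediately via needs_to_move
            obtain ⟨hdy0, hdxm⟩ := hsp
            subst hdy0; subst hdxm
            have hhit : (if (-1 : Int) ≠ 1 then
                (if (-1 : Int) ≠ -1 then [(x + -1, y + 0)] else ([] : List (Int × Int)))
                ++ [(x + -1 + 1, y + 0)]
                else (if (-1 : Int) ≠ -1 then [(x + -1, y + 0)] else []))
                = [(x, y)] := by norm_num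
            rw [hhit]
            simp only [pvLoopGen]
            split_ifs with hbd
            · simp
            · have hgo : pvGoA boxes border (-1) 0 (k + 1) x y (PySem.Set.add ntm (x, y))
                  = some (true, PySem.Set.add ntm (x, y)) := by
                rw [pvGoA_succ]
                rw [if_neg (fun hcon => hcon.1 hbx)]
                rw [if_pos ((PySem.Set.mem_add ntm (x, y) (x, y)).mpr (Or.inr rfl))]
              rw [show pvGoA boxes border (-1) 0 (k + 1) ((x, y) : Int × Int).1
                  ((x, y) : Int × Int).2 (PySem.Set.add ntm (x, y))
                  = some (true, PySem.Set.add ntm (x, y)) from hgo]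
              simp
          · refine pvChildTerm boxes border dx dy hpre k IH x y hm (x, y) hbx (Or.inl rfl)
              _ ?_ (PySem.Set.add ntm (x, y))
            intro c hc
            have hdx0 : dy = 0 → dx ≠ 0 := fun hh hk0 => hpre ⟨hk0, hh⟩
            by_cases hx1 : dx ≠ 1
            · rw [if_pos hx1] at hc
              by_cases hxm : dx ≠ -1
              · rw [if_pos hxm] at hc
                rcases List.mem_append.mp hc with hc' | hc'
                · obtain rfl := List.mem_singleton.mp hc'
                  refine ⟨rfl, fun hdy0 => ?_⟩
                  have hsq := pvSq dx (hdx0 hdy0)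
                  have : (x + dx - x) * dx = dx * dx := by ring
                  linarith
                · obtain rfl := List.mem_singleton.mp hc'
                  refine ⟨rfl, fun hdy0 => ?_⟩
                  have h1' := pvMulAddOne dx (hdx0 hdy0) hxm
                  have : (x + dx + 1 - x) * dx = (dx + 1) * dx := by ring
                  linarith
              · rw [if_neg hxm] at hc
                obtain rfl := List.mem_singleton.mp (by simpa using hc)
                refine ⟨rfl, fun hdy0 => ?_⟩
                exact absurd ⟨hdy0, not_not.mp hxm⟩ hsp
            · rw [if_neg hx1] at hc
              by_cases hxm : dx ≠ -1
              · rw [if_pos hxm] at hc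
                obtain rfl := List.mem_singleton.mp hc
                refine ⟨rfl, fun hdy0 => ?_⟩
                have hsq := pvSq dx (hdx0 hdy0)
                have : (x + dx - x) * dx = dx * dx := by ring
                linarith
              · rw [if_neg hxm] at hc
                simp at hc
        · rw [if_neg hbx]
          have hlb : (x - 1, y) ∈ boxes := by
            rcases not_and_or.mp h1 with hh | hh
            · exact absurd (not_not.mp hh) hbx
            · exact not_not.mp hh
          refine pvChildTerm boxes border dx dy hpre k IH x y hm (x - 1, y) hlb (Or.inr rfl)
            _ ?_ (PySem.Set.add ntm (x - 1, y))
          intro c hc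
          have hdx0 : dy = 0 → dx ≠ 0 := fun hh hk0 => hpre ⟨hk0, hh⟩
          by_cases hx1 : dx ≠ 1
          · rw [if_pos hx1] at hc
            by_cases hxm : dx ≠ -1
            · rw [if_pos hxm] at hc
              rcases List.mem_append.mp hc with hc' | hc'
              · obtain rfl := List.mem_singleton.mp hc'
                refine ⟨rfl, fun hdy0 => ?_⟩
                have hsq := pvSq dx (hdx0 hdy0)
                have : (x + dx - x) * dx = dx * dx := by ring
                linarith
              · obtain rfl := List.mem_singleton.mp hc'
                refine ⟨rfl, fun hdy0 => ?_⟩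
                have h1' := pvMulSubOne dx (hdx0 hdy0) hx1
                have : (x + dx - 1 - x) * dx = (dx - 1) * dx := by ring
                linarith
            · rw [if_neg hxm] at hc
              obtain rfl := List.mem_singleton.mp (by simpa using hc)
              refine ⟨rfl, fun hdy0 => ?_⟩
              have hdxv : dx = -1 := not_not.mp hxm
              have h1' := pvMulSubOne dx (hdx0 hdy0) hx1
              have : (x + dx - 1 - x) * dx = (dx - 1) * dx := by ring
              linarith
          · rw [if_neg hx1] at hc
            by_cases hxm : dx ≠ -1
            · rw [if_pos hxm] at hc
              obtain rfl := List.mem_singleton.mp hc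
              refine ⟨rfl, fun hdy0 => ?_⟩
              have hsq := pvSq dx (hdx0 hdy0)
              have : (x + dx - x) * dx = dx * dx := by ring
              linarith
            · rw [if_neg hxm] at hc
              simp at hc

-- ===== VERDICT (by name: the statement is the Claim_ definition above) =====
theorem can_i_move_box_spec : Claim_equal_can_i_move_box := by
  unfold Claim_equal_can_i_move_box
  intro boxes border x y dx dy ntm _hdom hpre
  unfold Pre_can_i_move_box at hpre
  unfold Spec_can_i_move_box
  have hne : pvGoA boxes border dx dy (2 * boxes.length + 2) x y ntm ≠ none := by
    have h := pvGoA_ne_none boxes border dx dy hpre (2 * boxes.length + 1) x y ntm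
      (pvMeas_le boxes dx dy x y)
    rwa [show 2 * boxes.length + 1 + 1 = 2 * boxes.length + 2 from by omega] at h
  cases hA : pvGoA boxes border dx dy (2 * boxes.length + 2) x y ntm with
  | none => exact absurd hA hne
  | some p =>
    obtain ⟨r, s'⟩ := p
    have hsim := pvSimGo boxes border dx dy (2 * boxes.length + 2) x y ntm r s' hA [] 1
    unfold can_i_move_box can_i_move_box_alt
    rw [hA]
    cases r with
    | true =>
      have hrun : pvRunB boxes border dx dy 1 [] s' = some true := rfl
      have hb := hsim.1 rfl true hrun
      rw [hb]
    | false =>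
      have hb := hsim.2 rfl
      rw [hb]
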